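-- pv_equiv track=rewrite | github.com/KayleighWasTaken/codewars | solutions/py/6 kyu/IntroductionToEsolangsAndMyFirstInterpreterMiniStringFuck.py | my_first_interpreter
-- ===== SOURCE A (Python) =====
-- def my_first_interpreter(code):
--     memory_cell = 0
--     output = ""
--     for instruction in code:
--         match instruction:
--             case "+":
--                 memory_cell = (memory_cell + 1) & 0xFF
--             case ".":
--                 output = output + chr(memory_cell)
--             case _:
--                 pass
--     return output
-- ===== SOURCE B (Python) =====
-- def my_first_interpreter(code):
--     # Two-phase: materialize prefix counts of '+', then join output for '.' positions.
--     total = 0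
--     prefix = []
--     for ch in code:
--         total += (ch == '+')
--         prefix.append(total)
--     return ''.join(chr(p % 256) for ch, p in zip(code, prefix) if ch == '.')
-- ===== Notes on version B (the rewrite author's own statement) =====
-- stated objective: alternative
-- what changed: Replaces the single-pass mutable-cell interpreter by a two-phase decomposition: first materialize a prefix-count array of increment instructions, then build the output by joining chr(count mod 256) at each output-instruction position.
import Mathlib
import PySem

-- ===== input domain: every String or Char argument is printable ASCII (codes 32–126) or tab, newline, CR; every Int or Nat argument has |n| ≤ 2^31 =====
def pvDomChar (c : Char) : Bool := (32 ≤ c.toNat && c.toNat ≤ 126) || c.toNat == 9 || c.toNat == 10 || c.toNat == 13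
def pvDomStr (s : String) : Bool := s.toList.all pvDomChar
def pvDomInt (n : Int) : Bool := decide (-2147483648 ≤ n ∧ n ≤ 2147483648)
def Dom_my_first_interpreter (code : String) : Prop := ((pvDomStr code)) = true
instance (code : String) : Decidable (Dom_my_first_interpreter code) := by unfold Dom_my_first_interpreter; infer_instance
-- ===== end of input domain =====

-- B replaces A's single-pass mutable-cell interpreter by a two-phase decomposition
-- (materialized prefix counts of '+', then a join over the '.' positions); same cost.

-- ===== PORT A =====
-- the for-loop over code with state (memory_cell, output)
def pvARun : List Char → Nat → String → String
  | [], _, out => out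
  | c :: cs, cell, out =>
    if c = '+' then pvARun cs ((cell + 1) &&& 255) out
    else if c = '.' then pvARun cs cell (out ++ String.ofList [Char.ofNat cell])
    else pvARun cs cell out

def my_first_interpreter (code : String) : String := pvARun code.toList 0 ""

-- ===== PORT B =====
def my_first_interpreter_alt (code : String) : String :=
  -- phase 1: materialize the prefix counts of '+'
  let st := code.toList.foldl
    (fun (st : Nat × List Nat) ch =>
      let t := st.1 + (if ch = '+' then 1 else 0); (t, st.2 ++ [t])) (0, [])
  -- phase 2: join chr(p % 256) over the '.' positions
  String.ofList ((((code.toList.zip st.2).filter (fun p => p.1 = '.')).map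
    (fun p => Char.ofNat (p.2 % 256))))

-- ===== PRECONDITION & SPEC =====
def Spec_my_first_interpreter (code : String) (out : String) : Prop := out = my_first_interpreter_alt code
instance (code : String) (out : String) : Decidable (Spec_my_first_interpreter code out) := by unfold Spec_my_first_interpreter; infer_instance

-- ===== CLAIM (what is proved, stated in full; the proofs are below) =====
def Claim_equal_my_first_interpreter : Prop := ∀ (code : String), Dom_my_first_interpreter code → Spec_my_first_interpreter code (my_first_interpreter code)

-- ===== LEMMAS AND PROOFS =====

-- pure recursive description of the prefix-count list
def pvPref : List Char → Nat → List Nat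
  | [], _ => []
  | c :: cs, t =>
    let t' := t + (if c = '+' then 1 else 0); t' :: pvPref cs t'

theorem pvFoldl_pref (cs : List Char) : ∀ (t : Nat) (l : List Nat),
    (cs.foldl (fun (st : Nat × List Nat) ch =>
      let t := st.1 + (if ch = '+' then 1 else 0); (t, st.2 ++ [t])) (t, l)).2
    = l ++ pvPref cs t := by
  induction cs with
  | nil => intro t l; simp [pvPref]
  | cons c cs ih =>
    intro t l
    simp only [List.foldl, pvPref, ih]
    simp

theorem pvARun_eq (cs : List Char) : ∀ (t : Nat) (out : String),
    pvARun cs (t % 256) out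
    = out ++ String.ofList (((cs.zip (pvPref cs t)).filter (fun p => p.1 = '.')).map
        (fun p => Char.ofNat (p.2 % 256))) := by
  induction cs with
  | nil => intro t out; simp [pvARun, pvPref, String.ofList_nil]
  | cons c cs ih =>
    intro t out
    by_cases hp : c = '+'
    · have h255 : (t % 256 + 1) &&& 255 = (t + 1) % 256 := by
        have := Nat.and_two_pow_sub_one_eq_mod (t % 256 + 1) 8
        have h2 : (t % 256 + 1) % 256 = (t + 1) % 256 := by omega
        simpa [h2] using this
      simp [pvARun, pvPref, hp, h255, ih]
    · by_cases hd : c = '.'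
      · simp only [pvARun, pvPref, hd, ih]
        simp
        rw [show (Char.ofNat (t % 256) :: List.map (fun p => Char.ofNat (p.2 % 256))
              (List.filter (fun p => decide (p.1 = '.')) (cs.zip (pvPref cs t))))
            = [Char.ofNat (t % 256)] ++ List.map (fun p => Char.ofNat (p.2 % 256))
              (List.filter (fun p => decide (p.1 = '.')) (cs.zip (pvPref cs t))) from rfl,
           String.ofList_append, String.append_assoc]
      · simp [pvARun, pvPref, hp, hd, ih]

-- ===== VERDICT (by name: the statement is the Claim_ definition above) =====
theorem my_first_interpreter_spec : Claim_equal_my_first_interpreter := by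
  intro code _
  unfold Spec_my_first_interpreter my_first_interpreter my_first_interpreter_alt
  simp only [pvFoldl_pref, List.nil_append]
  have := pvARun_eq code.toList 0 ""
  simpa using this
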